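-- pv_equiv track=rewrite | github.com/ezetabo/UTN-TUPaD-P1 | 06_TP8_Archivos/funciones_generales.py | buscar_prodcuto_por_nombre
-- ===== SOURCE A (Python) =====
-- import unicodedata
--
-- def normalizar_cadena(texto: str) -> str:
--     '''
--     Normaliza una cadena de texto eliminando acentos y convirtiéndola a minúsculas.
--
--     Parámetros:
--         texto (str): Cadena de texto a normalizar.
--
--     Retorna:
--         str: La cadena normalizada, en minúsculas y sin acentos.
--     '''
--     return ''.join(c for c in unicodedata.normalize('NFD', texto) if unicodedata.category(c) != 'Mn').lower()
--
-- def buscar_prodcuto_por_nombre(productos:list[dict], nombre:str)->list[dict]: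
--     '''
--     Busca productos por coincidencia exacta o parcial en una lista de diccionarios.
--
--     Parámetros
--     productos (list[dict]): Lista de productos representados como diccionarios.
--     nombre (str): Nombre (o parte del nombre) del producto a buscar.
--
--     Retorna
--
--     list[dict]
--         - Si encuentra una coincidencia exacta, devuelve una lista con un solo diccionario correspondiente a ese producto.
--         - Si no hay coincidencia exacta, devuelve una lista con todos los productos cuyo nombre contenga la cadena buscada.
--         - Si no encuentra ninguna coincidencia, devuelve una lista vacía.
--     '''
--     encontrados = []
--     for producto in productos:
--         if normalizar_cadena(producto['nombre']) == normalizar_cadena(nombre):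
--             return [producto]
--         elif normalizar_cadena(producto['nombre']).startswith(normalizar_cadena(nombre)):
--             encontrados.append(producto)
--     return encontrados
-- ===== SOURCE B (Python) =====
-- import unicodedata
--
-- def normalizar_cadena(texto: str) -> str:
--     return ''.join(c for c in unicodedata.normalize('NFD', texto) if unicodedata.category(c) != 'Mn').lower()
--
-- def buscar_prodcuto_por_nombre(productos: list[dict], nombre: str) -> list[dict]:
--     objetivo = normalizar_cadena(nombre)
--     # Pass 1: first exact match wins as a singleton.
--     for producto in productos:
--         if normalizar_cadena(producto['nombre']) == objetivo:
--             return [producto]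
--     # Pass 2: no exact match anywhere -> all prefix matches.
--     return [p for p in productos if normalizar_cadena(p['nombre']).startswith(objetivo)]
-- ===== Notes on version B (the rewrite author's own statement) =====
-- stated objective: simpler
-- what changed: Replaces A's single interleaved scan with an accumulator (exact match returns early, prefix matches appended along the way) by two separate shapeless passes: normalize the target once, find the first exact match, otherwise a plain filter comprehension over all prefix matches.
import Mathlib
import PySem

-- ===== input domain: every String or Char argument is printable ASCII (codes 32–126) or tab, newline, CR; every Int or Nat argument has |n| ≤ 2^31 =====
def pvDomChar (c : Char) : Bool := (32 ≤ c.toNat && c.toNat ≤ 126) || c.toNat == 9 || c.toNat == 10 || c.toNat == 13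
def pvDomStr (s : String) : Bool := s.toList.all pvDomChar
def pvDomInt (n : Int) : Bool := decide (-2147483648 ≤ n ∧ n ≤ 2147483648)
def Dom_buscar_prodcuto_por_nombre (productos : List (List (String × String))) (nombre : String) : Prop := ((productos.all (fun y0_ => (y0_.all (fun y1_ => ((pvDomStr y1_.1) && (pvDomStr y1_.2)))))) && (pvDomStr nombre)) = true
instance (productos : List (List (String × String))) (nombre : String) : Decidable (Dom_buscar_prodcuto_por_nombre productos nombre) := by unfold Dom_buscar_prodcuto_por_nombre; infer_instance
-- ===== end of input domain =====

-- B: two separate passes (first exact match via find?, else a filter of prefix matches)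
-- instead of A's single interleaved scan with an accumulator; same O(n) cost, plainer shape.


-- ===== PORT A =====
-- producto['nombre']: first-match assoc lookup; KeyError (none) is excluded by Pre_, so .getD "" is never the value used.
def pvNombre (p : List (String × String)) : String :=
  ((p.find? (fun kv => kv.1 == "nombre")).map (·.2)).getD ""

-- normalizar_cadena: on the printable-ASCII Dom, NFD is the identity and no char has category Mn,
-- so the function is exactly str.lower — ported as PySem.Str.lower (exact on this domain).
def pvNorm (s : String) : String := PySem.Str.lower s

-- A's single scan: exact match returns [p] at once, else prefix matches are appended to encontrados.
def pvGoA (nombre : String) : List (List (String × String)) → List (List (String × String)) → List (List (String × String))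
  | [], enc => enc
  | p :: rest, enc =>
    if pvNorm (pvNombre p) == pvNorm nombre then [p]
    else if PySem.Str.startswith (pvNorm (pvNombre p)) (pvNorm nombre) then
      pvGoA nombre rest (enc ++ [p])
    else pvGoA nombre rest enc

def buscar_prodcuto_por_nombre (productos : List (List (String × String))) (nombre : String) : List (List (String × String)) :=
  pvGoA nombre productos []

-- ===== PORT B =====
def buscar_prodcuto_por_nombre_alt (productos : List (List (String × String))) (nombre : String) : List (List (String × String)) :=
  let objetivo := pvNorm nombre
  match productos.find? (fun p => pvNorm (pvNombre p) == objetivo) with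
  | some p => [p]
  | none => productos.filter (fun p => PySem.Str.startswith (pvNorm (pvNombre p)) objetivo)

-- ===== PRECONDITION & SPEC =====
-- Pre_ excludes exactly the inputs on which Python A raises KeyError: some product dict lacks the
-- key 'nombre' and no exact-name match occurs among the products before the first such dict
-- (an earlier exact match returns before the scan reaches it).
def Pre_buscar_prodcuto_por_nombre (productos : List (List (String × String))) (nombre : String) : Prop :=
  productos.all (fun p => p.any (fun kv => kv.1 == "nombre")) = true ∨
  (productos.takeWhile (fun p => p.any (fun kv => kv.1 == "nombre"))).any
    (fun p => pvNorm (pvNombre p) == pvNorm nombre) = true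
instance (productos : List (List (String × String))) (nombre : String) : Decidable (Pre_buscar_prodcuto_por_nombre productos nombre) := by unfold Pre_buscar_prodcuto_por_nombre; infer_instance

def pvWitness_buscar_prodcuto_por_nombre : (List (List (String × String))) × String :=
  ([[("nombre", "Pan")], [("nombre", "pan integral")]], "pan")

def Spec_buscar_prodcuto_por_nombre (productos : List (List (String × String))) (nombre : String) (out : List (List (String × String))) : Prop := out = buscar_prodcuto_por_nombre_alt productos nombre
instance (productos : List (List (String × String))) (nombre : String) (out : List (List (String × String))) : Decidable (Spec_buscar_prodcuto_por_nombre productos nombre out) := by unfold Spec_buscar_prodcuto_por_nombre; infer_instance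

-- ===== CLAIM (what is proved, stated in full; the proofs are below) =====
def Claim_equal_buscar_prodcuto_por_nombre : Prop := ∀ (productos : List (List (String × String))) (nombre : String), Dom_buscar_prodcuto_por_nombre productos nombre → Pre_buscar_prodcuto_por_nombre productos nombre → Spec_buscar_prodcuto_por_nombre productos nombre (buscar_prodcuto_por_nombre productos nombre)

-- ===== LEMMAS AND PROOFS =====
-- Loop invariant for A's scan: with accumulator enc, it yields the first exact match as a
-- singleton if one exists, and otherwise enc followed by all prefix matches.
theorem pvGoA_eq (nombre : String) (l : List (List (String × String))) :
    ∀ enc, pvGoA nombre l enc =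
      match l.find? (fun p => pvNorm (pvNombre p) == pvNorm nombre) with
      | some p => [p]
      | none => enc ++ l.filter (fun p => PySem.Str.startswith (pvNorm (pvNombre p)) (pvNorm nombre)) := by
  induction l with
  | nil => intro enc; simp [pvGoA]
  | cons p rest ih =>
    intro enc
    by_cases hex : (pvNorm (pvNombre p) == pvNorm nombre) = true
    · simp [pvGoA, hex, List.find?_cons]
    · by_cases hpre : PySem.Str.startswith (pvNorm (pvNombre p)) (pvNorm nombre) = true
      all_goals simp only [PySem.Str.startswith_eq] at hpre
      · simp only [pvGoA, hex, Bool.false_eq_true, if_false, hpre, if_true, ih,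
          List.find?_cons, List.filter_cons]
        cases h : rest.find? (fun q => pvNorm (pvNombre q) == pvNorm nombre)
        · simp [h, hpre]
        · simp [h]
      · simp [pvGoA, hex, hpre, ih, List.find?_cons, List.filter_cons]

-- ===== VERDICT (by name: the statement is the Claim_ definition above) =====
theorem buscar_prodcuto_por_nombre_spec : Claim_equal_buscar_prodcuto_por_nombre := by
  intro productos nombre _ _
  unfold Spec_buscar_prodcuto_por_nombre buscar_prodcuto_por_nombre buscar_prodcuto_por_nombre_alt
  rw [pvGoA_eq]
  cases h : productos.find? (fun p => pvNorm (pvNombre p) == pvNorm nombre) <;> simp [h]
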